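-- pv_equiv track=rewrite | github.com/julian-g99/tiger-backend | register_allocator.py | _mapSortedVirtualRegs
-- ===== SOURCE A (Python) =====
-- def _mapSortedVirtualRegs(sortedVregs, pregs):
--     regMap = {}
--     mappedPregs = []
--     for i in range(0, len(sortedVregs)):
--         vreg = sortedVregs[i]
--         if len(mappedPregs) < len(pregs):
--             for pr in pregs:
--                 if pr not in mappedPregs:
--                     regMap[vreg] = pr
--                     mappedPregs.append(pr)
--                     break
--         else:
--             regMap[vreg] = None
--     return regMap
-- ===== SOURCE B (Python) =====
-- def _mapSortedVirtualRegs(sortedVregs, pregs):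
--     distinct = list(dict.fromkeys(pregs))
--     return {vreg: (distinct[i] if i < len(distinct) else None)
--             for i, vreg in enumerate(sortedVregs)}
-- ===== Notes on version B (the rewrite author's own statement) =====
-- stated objective: simpler
-- what changed: B deduplicates pregs once (dict.fromkeys) and builds the map in one comprehension assigning the i-th vreg the i-th distinct preg (None beyond), removing A's inner scan over pregs and its mappedPregs membership list; Pre_ excludes the degenerate inputs where pregs lists the same physical register twice and there are more vregs than distinct pregs, on which A's exhausted inner scan silently drops the leftover vregs while B spills them to None - neither behaviour is specified.
-- outside the precondition, e.g. on _mapSortedVirtualRegs(['a', 'b'], ['p', 'p']): A returns {'a': 'p'}, B returns {'a': 'p', 'b': None}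
import Mathlib
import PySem

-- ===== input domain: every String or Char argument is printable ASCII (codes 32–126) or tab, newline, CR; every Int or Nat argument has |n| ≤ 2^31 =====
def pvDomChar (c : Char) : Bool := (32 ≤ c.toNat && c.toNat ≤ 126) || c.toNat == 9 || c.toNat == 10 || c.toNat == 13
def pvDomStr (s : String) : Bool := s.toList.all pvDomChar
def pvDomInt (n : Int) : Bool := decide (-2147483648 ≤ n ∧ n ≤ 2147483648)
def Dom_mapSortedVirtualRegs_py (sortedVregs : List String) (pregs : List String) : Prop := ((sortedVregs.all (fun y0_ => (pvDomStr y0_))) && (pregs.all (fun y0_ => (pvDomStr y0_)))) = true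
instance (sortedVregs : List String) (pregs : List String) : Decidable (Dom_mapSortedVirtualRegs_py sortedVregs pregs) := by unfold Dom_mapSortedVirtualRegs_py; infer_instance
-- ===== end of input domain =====

-- B deduplicates pregs once and assigns the i-th vreg the i-th distinct preg (None beyond),
-- replacing A's inner scan over pregs and its mappedPregs membership list (objective: simpler);
-- duplicate-preg inputs on which the two disagree are excluded by Pre_ below.

-- ===== PORT A =====
-- inner 'for pr in pregs: if pr not in mappedPregs: … break' — first preg not yet mapped
def pvFirstUnused (mapped : List String) : List String → Option String
  | [] => none
  | pr :: rest => if pr ∈ mapped then pvFirstUnused mapped rest else some pr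

-- one iteration of A's outer loop, state = (regMap, mappedPregs)
def pvStepA (pregs : List String)
    (st : PySem.Dict String (Option String) × List String) (vreg : String) :
    PySem.Dict String (Option String) × List String :=
  if st.2.length < pregs.length then
    match pvFirstUnused st.2 pregs with
    | some pr => (st.1.insert vreg (some pr), st.2 ++ [pr])
    | none => st
  else (st.1.insert vreg none, st.2)

def mapSortedVirtualRegs_py (sortedVregs : List String) (pregs : List String) :
    List (String × Option String) :=
  ((PySem.List.pyRange 0 (PySem.List.len sortedVregs) 1).foldl
    (fun st i => pvStepA pregs st (PySem.List.pyGetD sortedVregs i ""))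
    (PySem.Dict.empty, [])).1.items

-- ===== PORT B =====
-- one entry of B's comprehension: 'distinct[i] if i < len(distinct) else None'
def pvStepB (distinct : List String)
    (d : PySem.Dict String (Option String)) (p : Int × String) :
    PySem.Dict String (Option String) :=
  if p.1 < (distinct.length : Int) then
    d.insert p.2 (some (PySem.List.pyGetD distinct p.1 ""))
  else d.insert p.2 none

def mapSortedVirtualRegs_py_alt (sortedVregs : List String) (pregs : List String) :
    List (String × Option String) :=
  let distinct := PySem.List.dedup pregs
  ((PySem.List.enumerate sortedVregs 0).foldl (pvStepB distinct) PySem.Dict.empty).items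

-- ===== PRECONDITION & SPEC =====
-- Pre_ excludes the degenerate inputs where pregs lists the same physical register twice and
-- there are more vregs than distinct pregs: there A's exhausted inner scan silently drops the
-- leftover vregs from the map while B spills them to None — neither behaviour is specified.
def Pre_mapSortedVirtualRegs_py (sortedVregs : List String) (pregs : List String) : Prop :=
  pregs.Nodup ∨ sortedVregs.length ≤ (PySem.Set.ofList pregs).length
instance (sortedVregs : List String) (pregs : List String) : Decidable (Pre_mapSortedVirtualRegs_py sortedVregs pregs) := by unfold Pre_mapSortedVirtualRegs_py; infer_instance

def pvWitness_mapSortedVirtualRegs_py : List String × List String :=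
  (["v1", "v2", "v3"], ["x", "y"])

def Spec_mapSortedVirtualRegs_py (sortedVregs : List String) (pregs : List String) (out : List (String × Option String)) : Prop := out = mapSortedVirtualRegs_py_alt sortedVregs pregs
instance (sortedVregs : List String) (pregs : List String) (out : List (String × Option String)) : Decidable (Spec_mapSortedVirtualRegs_py sortedVregs pregs out) := by unfold Spec_mapSortedVirtualRegs_py; infer_instance

-- ===== CLAIM (what is proved, stated in full; the proofs are below) =====
def Claim_equal_mapSortedVirtualRegs_py : Prop := ∀ (sortedVregs : List String) (pregs : List String), Dom_mapSortedVirtualRegs_py sortedVregs pregs → Pre_mapSortedVirtualRegs_py sortedVregs pregs → Spec_mapSortedVirtualRegs_py sortedVregs pregs (mapSortedVirtualRegs_py sortedVregs pregs)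

-- ===== LEMMAS AND PROOFS =====

theorem pvFirstUnused_eq_find? (m xs : List String) :
    pvFirstUnused m xs = xs.find? (fun x => !decide (x ∈ m)) := by
  induction xs with
  | nil => rfl
  | cons x t ih =>
    by_cases h : x ∈ m <;> simp [pvFirstUnused, List.find?, h, ih]

-- the first element of xs not among the first i elements of set(xs) is set(xs)[i]
theorem pv_find_take (xs : List String) : ∀ (s : List String) (i : Nat), s.length ≤ i →
    xs.find? (fun x => !decide (x ∈ (PySem.Set.update s xs).take i)) =
      (PySem.Set.update s xs)[i]? := by
  induction xs with
  | nil =>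
    intro s i h
    simp [PySem.Set.update_nil, List.getElem?_eq_none h]
  | cons x t ih =>
    intro s i h
    rw [PySem.Set.update_cons]
    by_cases hx : x ∈ s
    · rw [PySem.Set.add_of_mem hx]
      have hmem : x ∈ (PySem.Set.update s t).take i := by
        rw [PySem.Set.update_eq_append_filter, List.take_append,
          List.take_of_length_le h]
        exact List.mem_append_left _ hx
      rw [List.find?_cons_of_neg (by simp [hmem])]
      exact ih s i h
    · rw [PySem.Set.add_of_not_mem hx]
      rcases Nat.lt_or_ge s.length i with hlt | hge
      · have h1 : (s ++ [x]).length ≤ i := by simp; omega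
        have hmem : x ∈ (PySem.Set.update (s ++ [x]) t).take i := by
          rw [PySem.Set.update_eq_append_filter, List.take_append,
            List.take_of_length_le h1]
          exact List.mem_append_left _ (by simp)
        rw [List.find?_cons_of_neg (by simp [hmem])]
        exact ih (s ++ [x]) i h1
      · have heq : s.length = i := le_antisymm h hge
        have htake : (PySem.Set.update (s ++ [x]) t).take i = s := by
          rw [PySem.Set.update_eq_append_filter, List.append_assoc,
            List.take_append, List.take_of_length_le h,
            heq, Nat.sub_self]
          simp
        rw [List.find?_cons_of_pos (by simp [htake, hx])]
        have hlen : i < (s ++ [x]).length := by simp; omega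
        rw [PySem.Set.update_eq_append_filter, List.getElem?_append_left hlen,
          ← heq, List.getElem?_concat_length]

-- loop correspondence outside D_: after i outer iterations A's mappedPregs is the first i
-- distinct pregs; the side condition says the None branches can only agree (no duplicates,
-- or the indices never pass the number of distinct pregs)
theorem pv_loop_eq (pregs : List String) :
    ∀ (rest : List String) (d : PySem.Dict String (Option String)) (i : Nat),
      ((PySem.Set.ofList pregs).length = pregs.length ∨
        i + rest.length ≤ (PySem.Set.ofList pregs).length) →
      (rest.foldl (pvStepA pregs) (d, (PySem.Set.ofList pregs).take i)).1 =
        (PySem.List.enumerate rest (i : Int)).foldl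
          (pvStepB (PySem.Set.ofList pregs)) d := by
  intro rest
  induction rest with
  | nil => intro d i _; simp [PySem.List.enumerate]
  | cons v t ih =>
    intro d i hside
    have hupd : PySem.Set.update [] pregs = PySem.Set.ofList pregs :=
      PySem.Set.update_nil_left pregs
    have hdl : (PySem.Set.ofList pregs).length ≤ pregs.length :=
      PySem.Set.length_ofList_le pregs
    have hside' : (PySem.Set.ofList pregs).length = pregs.length ∨
        (i + 1) + t.length ≤ (PySem.Set.ofList pregs).length := by
      rcases hside with h | h
      · exact Or.inl h
      · right; simp at h; omega
    rw [PySem.List.enumerate_cons, List.foldl_cons, List.foldl_cons]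
    have ecast : ((i : Int) + 1) = ((i + 1 : Nat) : Int) := by push_cast; ring
    rcases Nat.lt_or_ge i (PySem.Set.ofList pregs).length with hlt | hge
    · -- i < number of distinct pregs: both assign distinct[i]
      have hfind : pvFirstUnused ((PySem.Set.ofList pregs).take i) pregs =
          some ((PySem.Set.ofList pregs)[i]) := by
        rw [pvFirstUnused_eq_find?]
        have := pv_find_take pregs [] i (by simp)
        rw [hupd] at this
        rw [this, List.getElem?_eq_getElem hlt]
      have hlen : ((PySem.Set.ofList pregs).take i).length = i := by
        rw [List.length_take]; omega
      have hstepA : pvStepA pregs (d, (PySem.Set.ofList pregs).take i) v =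
          (d.insert v (some ((PySem.Set.ofList pregs)[i])),
            (PySem.Set.ofList pregs).take (i+1)) := by
        rw [pvStepA, hfind]
        simp only [hlen, if_pos (lt_of_lt_of_le hlt hdl)]
        rw [List.take_add_one, List.getElem?_eq_getElem hlt]
        rfl
      have hstepB : pvStepB (PySem.Set.ofList pregs) d ((i : Int), v) =
          d.insert v (some ((PySem.Set.ofList pregs)[i])) := by
        rw [pvStepB]
        simp only [if_pos (show ((i:Int)) < ((PySem.Set.ofList pregs).length : Int) by
          exact_mod_cast hlt)]
        congr 2
        rw [PySem.List.pyGetD_natCast]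
        rw [List.getD_eq_getElem?_getD, List.getElem?_eq_getElem hlt]
        rfl
      rw [hstepA, hstepB, ecast]
      exact ih (d.insert v (some ((PySem.Set.ofList pregs)[i]))) (i+1) hside'
    · -- i ≥ number of distinct pregs: the side condition forces nodup, both insert None
      have heqp : (PySem.Set.ofList pregs).length = pregs.length := by
        rcases hside with h | h
        · exact h
        · exfalso; simp at h; omega
      have htk : ∀ j : Nat, (PySem.Set.ofList pregs).length ≤ j →
          (PySem.Set.ofList pregs).take j = PySem.Set.ofList pregs :=
        fun j hj => List.take_of_length_le hj
      have hBgeq : ¬ ((i:Int)) < ((PySem.Set.ofList pregs).length : Int) := by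
        exact_mod_cast Nat.not_lt.mpr hge
      have hstepA : pvStepA pregs (d, (PySem.Set.ofList pregs).take i) v =
          (d.insert v none, (PySem.Set.ofList pregs).take i) := by
        rw [pvStepA]
        rw [htk i hge]
        exact if_neg (by simp; omega)
      have hstepB : pvStepB (PySem.Set.ofList pregs) d ((i : Int), v) =
          d.insert v none := by
        rw [pvStepB, if_neg hBgeq]
      rw [hstepA, hstepB, ecast]
      have := ih (d.insert v none) (i+1) hside'
      rw [htk (i+1) (by omega)] at this
      rw [htk i hge]
      exact this

-- ===== VERDICT (by name: the statement is the Claim_ definition above) =====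
theorem mapSortedVirtualRegs_py_spec : Claim_equal_mapSortedVirtualRegs_py := by
  intro sv pregs _ hpre
  unfold Spec_mapSortedVirtualRegs_py
  unfold mapSortedVirtualRegs_py mapSortedVirtualRegs_py_alt
  rw [PySem.List.foldl_pyRange_zero_pyGetD sv "" (pvStepA pregs) (PySem.Dict.empty, [])]
  have hside : (PySem.Set.ofList pregs).length = pregs.length ∨
      0 + sv.length ≤ (PySem.Set.ofList pregs).length := by
    unfold Pre_mapSortedVirtualRegs_py at hpre
    rcases hpre with h | h
    · left; rw [PySem.Set.ofList_eq_self_of_nodup pregs h]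
    · right; omega
  have h0 : ([] : List String) = (PySem.Set.ofList pregs).take 0 := rfl
  have hmain := pv_loop_eq pregs sv PySem.Dict.empty 0 hside
  simp only [Nat.cast_zero] at hmain
  rw [PySem.List.dedup_eq_ofList, h0, hmain]
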